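-- pv_equiv track=rewrite | github.com/hassan5146/artificial-intelligence-learning-journey | Mid lab task/task1.py | choose_road
-- ===== SOURCE A (Python) =====
-- def choose_road(roads, last_green):
--
--     for road, traffic in roads.items():
--         if traffic == 1 and road != last_green:
--             return road
--
--     for road, traffic in roads.items():
--         if traffic == 0 and road != last_green:
--             return road
--     return None
-- ===== SOURCE B (Python) =====
-- def choose_road(roads, last_green):
--     zero_candidate = None
--     for road, traffic in roads.items():
--         if traffic == 1 and road != last_green:
--             return road
--         if traffic == 0 and road != last_green and zero_candidate is None:
--             zero_candidate = road
--     return zero_candidate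
-- ===== Notes on version B (the rewrite author's own statement) =====
-- stated objective: simpler
-- what changed: Replaces A's two sequential passes over the dict with one pass that returns a traffic==1 road immediately and records only the first eligible traffic==0 road as a fallback.
import Mathlib
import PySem

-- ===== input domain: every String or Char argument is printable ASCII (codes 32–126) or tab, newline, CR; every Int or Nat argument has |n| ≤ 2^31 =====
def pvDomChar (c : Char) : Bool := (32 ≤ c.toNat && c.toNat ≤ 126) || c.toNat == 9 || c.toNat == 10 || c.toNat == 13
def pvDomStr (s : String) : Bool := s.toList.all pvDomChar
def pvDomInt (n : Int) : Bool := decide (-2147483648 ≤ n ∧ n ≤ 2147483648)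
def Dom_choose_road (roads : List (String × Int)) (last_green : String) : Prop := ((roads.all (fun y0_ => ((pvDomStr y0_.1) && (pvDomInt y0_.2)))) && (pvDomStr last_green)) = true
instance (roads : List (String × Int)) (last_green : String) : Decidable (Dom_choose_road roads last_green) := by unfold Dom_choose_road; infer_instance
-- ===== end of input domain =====

-- B replaces A's two sequential passes with a single pass recording the first zero-traffic fallback (objective: simpler single traversal).

-- ===== PORT A =====
-- first loop of A: return first road with traffic == 1 and road != last_green
def chooseRoadLoop1 (roads : List (String × Int)) (last_green : String) : Option String :=
  match roads with
  | [] => none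
  | (road, traffic) :: rest =>
    if traffic == 1 && road != last_green then some road
    else chooseRoadLoop1 rest last_green

-- second loop of A: return first road with traffic == 0 and road != last_green
def chooseRoadLoop2 (roads : List (String × Int)) (last_green : String) : Option String :=
  match roads with
  | [] => none
  | (road, traffic) :: rest =>
    if traffic == 0 && road != last_green then some road
    else chooseRoadLoop2 rest last_green

def choose_road (roads : List (String × Int)) (last_green : String) : Option String :=
  match chooseRoadLoop1 roads last_green with
  | some road => some road
  | none =>
    match chooseRoadLoop2 roads last_green with
    | some road => some road
    | none => none

-- ===== PORT B =====
-- single loop with a once-set zero-candidate accumulator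
def chooseRoadAltGo (roads : List (String × Int)) (last_green : String)
    (zero_candidate : Option String) : Option String :=
  match roads with
  | [] => zero_candidate
  | (road, traffic) :: rest =>
    if traffic == 1 && road != last_green then some road
    else if traffic == 0 && road != last_green && zero_candidate.isNone then
      chooseRoadAltGo rest last_green (some road)
    else chooseRoadAltGo rest last_green zero_candidate

def choose_road_alt (roads : List (String × Int)) (last_green : String) : Option String :=
  chooseRoadAltGo roads last_green none

-- ===== PRECONDITION & SPEC =====
def Spec_choose_road (roads : List (String × Int)) (last_green : String) (out : Option String) : Prop := out = choose_road_alt roads last_green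
instance (roads : List (String × Int)) (last_green : String) (out : Option String) : Decidable (Spec_choose_road roads last_green out) := by unfold Spec_choose_road; infer_instance

-- ===== CLAIM (what is proved, stated in full; the proofs are below) =====
def Claim_equal_choose_road : Prop := ∀ (roads : List (String × Int)) (last_green : String), Dom_choose_road roads last_green → Spec_choose_road roads last_green (choose_road roads last_green)

-- ===== LEMMAS AND PROOFS =====

-- loop invariant: the single pass equals loop1, then the pending candidate, then loop2
theorem chooseRoadAltGo_eq (roads : List (String × Int)) (last_green : String)
    (cand : Option String) :
    chooseRoadAltGo roads last_green cand =
      match chooseRoadLoop1 roads last_green with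
      | some r => some r
      | none =>
        match cand with
        | some c => some c
        | none => chooseRoadLoop2 roads last_green := by
  induction roads generalizing cand with
  | nil => cases cand <;> simp [chooseRoadAltGo, chooseRoadLoop1, chooseRoadLoop2]
  | cons hd tl ih =>
    obtain ⟨road, traffic⟩ := hd
    simp only [chooseRoadAltGo, chooseRoadLoop1, chooseRoadLoop2]
    by_cases h1 : (traffic == 1 && road != last_green) = true
    · simp [h1]
    · simp only [h1, if_false, Bool.false_eq_true]
      cases cand with
      | some c =>
        simp only [Option.isNone_some, Bool.and_false, Bool.false_eq_true, if_false, ih]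
      | none =>
        by_cases h0 : (traffic == 0 && road != last_green) = true
        · simp [h0, ih]
        · simp [h0, ih]

-- ===== VERDICT (by name: the statement is the Claim_ definition above) =====
theorem choose_road_spec : Claim_equal_choose_road := by
  intro roads last_green _
  unfold Spec_choose_road choose_road choose_road_alt
  rw [chooseRoadAltGo_eq]
  cases chooseRoadLoop1 roads last_green <;>
    cases chooseRoadLoop2 roads last_green <;> rfl
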